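-- pv_equiv track=rewrite | github.com/AyyyStew/FindingTheFinger_2 | scripts/dimreduction/shared.py | compute_corpus_seqs
-- ===== SOURCE A (Python) =====
-- from collections import defaultdict
--
-- def compute_corpus_seqs(leaf_ids: list[int], corpus_id_of: dict[int, int]) -> dict[int, int]:
--     """Sequential rank of each leaf within its corpus (1-based), sorted by id."""
--     by_corpus: dict[int, list[int]] = defaultdict(list)
--     for uid in leaf_ids:
--         cid = corpus_id_of.get(uid)
--         if cid is not None:
--             by_corpus[cid].append(uid)
--
--     seq: dict[int, int] = {}
--     for cid, uids in by_corpus.items():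
--         for rank, uid in enumerate(sorted(uids), start=1):
--             seq[uid] = rank
--     return seq
-- ===== SOURCE B (Python) =====
-- def compute_corpus_seqs(leaf_ids: list[int], corpus_id_of: dict[int, int]) -> dict[int, int]:
--     """Sequential rank of each leaf within its corpus (1-based), sorted by id."""
--     qual = [u for u in leaf_ids if u in corpus_id_of]
--     # corpora in order of first qualifying appearance
--     order = list(dict.fromkeys(corpus_id_of[u] for u in qual))
--     # one global stable sort: by corpus appearance, then by id
--     qual.sort(key=lambda u: (order.index(corpus_id_of[u]), u))
--     counts: dict[int, int] = {}
--     seq: dict[int, int] = {}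
--     for u in qual:
--         c = corpus_id_of[u]
--         counts[c] = counts.get(c, 0) + 1
--         seq[u] = counts[c]
--     return seq
-- ===== Notes on version B (the rewrite author's own statement) =====
-- stated objective: alternative
-- what changed: A groups ids into per-corpus lists via a defaultdict and then sorts and enumerates each corpus separately; B does one global stable sort of the qualifying ids keyed by (corpus first-appearance order, id) followed by a single counting sweep with per-corpus running counters.
import Mathlib
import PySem

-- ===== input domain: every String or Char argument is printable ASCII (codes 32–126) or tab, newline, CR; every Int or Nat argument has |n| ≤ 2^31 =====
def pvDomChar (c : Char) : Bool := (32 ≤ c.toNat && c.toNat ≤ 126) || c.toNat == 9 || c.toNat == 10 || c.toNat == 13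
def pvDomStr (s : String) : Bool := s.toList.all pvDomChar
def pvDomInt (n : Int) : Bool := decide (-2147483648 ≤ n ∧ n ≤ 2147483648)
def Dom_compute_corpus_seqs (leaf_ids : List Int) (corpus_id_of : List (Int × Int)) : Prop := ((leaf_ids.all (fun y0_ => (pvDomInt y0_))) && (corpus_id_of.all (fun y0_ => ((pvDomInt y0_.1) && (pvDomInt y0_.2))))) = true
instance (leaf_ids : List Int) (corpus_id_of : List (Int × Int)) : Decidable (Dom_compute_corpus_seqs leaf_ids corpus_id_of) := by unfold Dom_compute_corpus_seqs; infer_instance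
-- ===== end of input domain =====

-- B replaces A's group-then-sort-each-corpus passes by ONE global stable sort (key: corpus
-- first-appearance, then id) followed by a single counting sweep; objective: alternative.

-- ===== PORT A =====
def compute_corpus_seqs (leaf_ids : List Int) (corpus_id_of : List (Int × Int)) : List (Int × Int) :=
  let co : PySem.Dict Int Int := PySem.Dict.mk corpus_id_of
  let by_corpus : PySem.Dict Int (List Int) :=
    leaf_ids.foldl (fun d uid =>
      match co.get? uid with
      | some cid => d.modify cid [] (fun l => l ++ [uid])
      | none => d) PySem.Dict.empty
  let seq : PySem.Dict Int Int :=
    by_corpus.items.foldl (fun s p =>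
      (PySem.List.enumerate (PySem.List.sorted p.2 (fun x => x)) 1).foldl
        (fun s ru => s.insert ru.2 ru.1) s) PySem.Dict.empty
  seq.items

-- ===== PORT B =====
def compute_corpus_seqs_alt (leaf_ids : List Int) (corpus_id_of : List (Int × Int)) : List (Int × Int) :=
  let co : PySem.Dict Int Int := PySem.Dict.mk corpus_id_of
  let qual : List Int := leaf_ids.foldl (fun acc u => if co.contains u then acc ++ [u] else acc) []
  -- corpora in first-appearance order; `corpus_id_of[u]` is ported as `(co.get? u).getD 0`,
  -- exact because every u reaching it is a key of co (u ∈ qual)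
  let order : List Int := PySem.List.dedup (qual.map (fun u => (co.get? u).getD 0))
  -- `order.index(c)` ported as `(index? order c).getD 0`, exact because c is always a member
  let qs : List Int := PySem.List.sorted2 qual
      (fun u => (PySem.List.index? order ((co.get? u).getD 0)).getD 0) (fun u => u)
  let final := qs.foldl (fun (st : PySem.Dict Int Int × PySem.Dict Int Int) u =>
      let c := (co.get? u).getD 0
      let v := st.1.getD c 0 + 1
      (st.1.insert c v, st.2.insert u v)) (PySem.Dict.empty, PySem.Dict.empty)
  final.2.items

-- ===== PRECONDITION & SPEC =====
def Spec_compute_corpus_seqs (leaf_ids : List Int) (corpus_id_of : List (Int × Int)) (out : List (Int × Int)) : Prop := out = compute_corpus_seqs_alt leaf_ids corpus_id_of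
instance (leaf_ids : List Int) (corpus_id_of : List (Int × Int)) (out : List (Int × Int)) : Decidable (Spec_compute_corpus_seqs leaf_ids corpus_id_of out) := by unfold Spec_compute_corpus_seqs; infer_instance

-- ===== CLAIM (what is proved, stated in full; the proofs are below) =====
def Claim_equal_compute_corpus_seqs : Prop := ∀ (leaf_ids : List Int) (corpus_id_of : List (Int × Int)), Dom_compute_corpus_seqs leaf_ids corpus_id_of → Spec_compute_corpus_seqs leaf_ids corpus_id_of (compute_corpus_seqs leaf_ids corpus_id_of)

-- ===== LEMMAS AND PROOFS =====

-- `corpus_id_of[u]` as both ports read it (default irrelevant: only used on keys of co)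
def pvF (co : PySem.Dict Int Int) (u : Int) : Int := (co.get? u).getD 0
-- the qualifying leaf ids, in input order
def pvQ (co : PySem.Dict Int Int) (l : List Int) : List Int := l.filter (fun u => co.contains u)
-- the distinct corpus ids, in first-appearance order
def pvC (co : PySem.Dict Int Int) (l : List Int) : List Int := PySem.Set.ofList ((pvQ co l).map (pvF co))
-- the qualifying ids of corpus c, in input order
def pvG (co : PySem.Dict Int Int) (l : List Int) (c : Int) : List Int :=
  (pvQ co l).filter (fun u => pvF co u == c)
-- B's counting step
def pvStepB (co : PySem.Dict Int Int) (st : PySem.Dict Int Int × PySem.Dict Int Int) (u : Int) :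
    PySem.Dict Int Int × PySem.Dict Int Int :=
  let c := (co.get? u).getD 0
  let v := st.1.getD c 0 + 1
  (st.1.insert c v, st.2.insert u v)

-- A's grouping loop, rewritten as a fold over the qualifying (cid, uid) pairs
lemma pv_grp (co : PySem.Dict Int Int) (l : List Int) (d : PySem.Dict Int (List Int)) :
    l.foldl (fun d uid =>
      match co.get? uid with
      | some cid => d.modify cid [] (fun l => l ++ [uid])
      | none => d) d
    = ((pvQ co l).map (fun u => (pvF co u, u))).foldl
        (fun d p => d.modify p.1 [] (fun x => x ++ [p.2])) d := by
  induction l generalizing d with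
  | nil => rfl
  | cons u t ih =>
    simp only [pvQ, List.foldl_cons, List.filter_cons]
    cases h : co.get? u with
    | some c =>
      have hc : co.contains u = true := by
        rw [PySem.Dict.contains_eq_isSome_get?, h]; rfl
      simp only [hc, if_true, List.map_cons, List.foldl_cons, pvF, h, Option.getD_some]
      exact ih _
    | none =>
      have hc : co.contains u = false := by
        rw [PySem.Dict.contains_eq_isSome_get?, h]; rfl
      simp only [hc, Bool.false_eq_true, if_false]
      exact ih _
lemma pv_set_update_nil (ys : List Int) :
    PySem.Set.update ([] : List Int) ys = PySem.Set.ofList ys := by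
  rw [PySem.Set.ofList_eq_foldl]; rfl

-- the items of A's grouping dict: distinct cids in first-appearance order, each with its group
lemma pv_items_byc (co : PySem.Dict Int Int) (l : List Int) :
    (((pvQ co l).map (fun u => (pvF co u, u))).foldl
        (fun d p => d.modify p.1 [] (fun x => x ++ [p.2])) PySem.Dict.empty).items
    = (pvC co l).map (fun c => (c, pvG co l c)) := by
  have hkeys : (((pvQ co l).map (fun u => (pvF co u, u))).foldl
      (fun d p => d.modify p.1 [] (fun x => x ++ [p.2])) PySem.Dict.empty).keys = pvC co l := by
    rw [PySem.Dict.keys_foldl_modify_key ((pvQ co l).map (fun u => (pvF co u, u)))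
      (fun p => p.1) [] (fun _ p => fun x => x ++ [p.2]) PySem.Dict.empty]
    rw [PySem.Dict.keys_empty, List.map_map, pv_set_update_nil]
    rfl
  have hnd := PySem.Dict.nodup_keys_foldl_modify_key ((pvQ co l).map (fun u => (pvF co u, u)))
      (fun p => p.1) [] (fun _ p => fun x => x ++ [p.2]) PySem.Dict.empty
      PySem.Dict.nodup_keys_empty
  rw [PySem.Dict.items_eq_map_keys _ hnd [], hkeys]
  apply List.map_congr_left
  intro c _
  have hget : (((pvQ co l).map (fun u => (pvF co u, u))).foldl
      (fun d p => d.modify p.1 [] (fun x => x ++ [p.2])) PySem.Dict.empty).getD c [] = pvG co l c := by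
    rw [PySem.Dict.getD_foldl_modify_append, PySem.Dict.getD_empty, List.nil_append,
      List.filter_map, List.map_map]
    have : ((fun p => p.1 == c) ∘ fun u => (pvF co u, u)) = (fun u => pvF co u == c) := rfl
    rw [this]
    have : ((fun p => p.2) ∘ fun u : Int => (pvF co u, u)) = id := rfl
    rw [this, List.map_id, pvG]
  rw [hget]

-- set-partition: a list is a permutation of its filter-blocks over the distinct keys
lemma pv_perm_partition (key : Int → Int) : ∀ (ks : List Int) (l : List Int), ks.Nodup →
    (∀ x ∈ l, key x ∈ ks) →
    l.Perm (ks.flatMap (fun k => l.filter (fun x => key x == k))) := by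
  intro ks
  induction ks with
  | nil =>
    intro l _ hmem
    cases l with
    | nil => simp
    | cons a t => exact absurd (hmem a (by simp)) (by simp)
  | cons k ks ih =>
    intro l hnd hmem
    rw [List.flatMap_cons]
    have h1 : l.Perm (l.filter (fun x => key x == k) ++ l.filter (fun x => !(key x == k))) :=
      (List.filter_append_perm _ l).symm
    have h3 : ∀ k' ∈ ks, (l.filter (fun x => !(key x == k))).filter (fun x => key x == k')
        = l.filter (fun x => key x == k') := by
      intro k' hk'
      have hne : k' ≠ k := by rintro rfl; exact (List.nodup_cons.mp hnd).1 hk'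
      rw [List.filter_filter]
      apply List.filter_congr
      intro x _
      by_cases hx : key x = k'
      · simp [hx, hne]
      · simp [hx]
    have h2 : (l.filter (fun x => !(key x == k))).Perm
        (ks.flatMap (fun k' => l.filter (fun x => key x == k'))) := by
      have := ih (l.filter (fun x => !(key x == k))) (List.nodup_cons.mp hnd).2 (by
        intro x hx
        have hxl := List.mem_of_mem_filter hx
        have hne := List.of_mem_filter hx
        have := hmem x hxl
        simp only [List.mem_cons] at this
        rcases this with h | h
        · exfalso; simp [h] at hne
        · exact h)
      refine this.trans ?_
      have : (ks.flatMap fun k' => (l.filter (fun x => !(key x == k))).filter (fun x => key x == k'))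
          = ks.flatMap (fun k' => l.filter (fun x => key x == k')) := by
        rw [List.flatMap_def, List.flatMap_def, List.map_congr_left h3]
      rw [this]
    exact h1.trans (List.Perm.append_left _ h2)

lemma pv_sorted2_eq_sorted_toLex (xs : List Int) (k1 : Int → Nat) (k2 : Int → Int) :
    PySem.List.sorted2 xs k1 k2 = PySem.List.sorted xs (fun x => toLex (k1 x, k2 x)) := by
  have hb : (fun a b => decide (k1 a < k1 b) || (!decide (k1 b < k1 a) && decide (k2 a < k2 b)))
      = (fun a b => decide ((toLex (k1 a, k2 a) : Lex (Nat × Int)) < toLex (k1 b, k2 b))) := by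
    funext a b
    by_cases h1 : k1 a < k1 b <;> by_cases h2 : k1 b < k1 a <;>
      simp [Prod.Lex.lt_iff, h1, h2] <;> omega
  simp only [PySem.List.sorted2, PySem.List.sorted]
  rw [hb]
  rfl

lemma pv_index_getElem (xs : List Int) (hnd : xs.Nodup) (i : Nat) (hi : i < xs.length) :
    PySem.List.index? xs xs[i] = some i := by
  rw [PySem.List.index?_eq_some_iff]
  refine ⟨xs.take i, xs.drop (i + 1), ?_, ?_, ?_⟩
  · conv_lhs => rw [← List.take_append_drop i xs]
    rw [← List.getElem_cons_drop hi]
  · simp [List.length_take, Nat.min_eq_left (Nat.le_of_lt hi)]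
  · intro hmem
    rw [List.mem_iff_getElem] at hmem
    obtain ⟨j, hj, hji⟩ := hmem
    have hjlen : j < i := by simp only [List.length_take] at hj; omega
    rw [List.getElem_take] at hji
    have := (List.Nodup.getElem_inj_iff hnd).mp hji
    omega

lemma pv_mem_block (co : PySem.Dict Int Int) (l : List Int) (c : Int) (u : Int)
    (hu : u ∈ PySem.List.sorted (pvG co l c) (fun x => x)) : u ∈ pvQ co l ∧ pvF co u = c := by
  have hu' : u ∈ pvG co l c := (PySem.List.sorted_perm _ _ _).mem_iff.mp hu
  exact ⟨List.mem_of_mem_filter hu', by simpa using List.of_mem_filter hu'⟩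

lemma pv_flatMap_perm (ks : List Int) (f g : Int → List Int)
    (h : ∀ a ∈ ks, (f a).Perm (g a)) : (ks.flatMap f).Perm (ks.flatMap g) := by
  induction ks with
  | nil => simp
  | cons k t ih =>
    rw [List.flatMap_cons, List.flatMap_cons]
    exact (h k (by simp)).append (ih (fun a ha => h a (by simp [ha])))

-- B's one global sort is A's per-corpus sorted groups, concatenated in first-appearance order
lemma pv_es_eq (co : PySem.Dict Int Int) (l : List Int) :
    PySem.List.sorted2 (pvQ co l)
      (fun u => (PySem.List.index? (pvC co l) ((co.get? u).getD 0)).getD 0) (fun u => u)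
    = (pvC co l).flatMap (fun c => PySem.List.sorted (pvG co l c) (fun x => x)) := by
  have hnd : (pvC co l).Nodup := PySem.Set.nodup_ofList _
  rw [pv_sorted2_eq_sorted_toLex]
  set key : Int → Lex (Nat × Int) :=
    fun u => toLex ((PySem.List.index? (pvC co l) ((co.get? u).getD 0)).getD 0, u) with hkey
  apply PySem.List.eq_of_perm_of_pairwise_le_of_injective key
  · intro a b h
    simpa using congrArg (fun p => (ofLex p).2) h
  · -- permutation
    refine (PySem.List.sorted_perm _ _ _).trans ?_
    refine (pv_perm_partition (pvF co) (pvC co l) (pvQ co l) hnd ?_).trans ?_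
    · intro x hx
      rw [pvC, PySem.Set.mem_ofList]
      exact List.mem_map_of_mem hx
    · exact pv_flatMap_perm _ _ _ (fun c _ => (PySem.List.sorted_perm (pvG co l c) _ _).symm)
  · exact PySem.List.sorted_pairwise _ _
  · -- Pairwise on the concatenated blocks
    rw [List.flatMap_def, List.pairwise_flatten]
    constructor
    · intro blk hblk
      rw [List.mem_map] at hblk
      obtain ⟨c, _, rfl⟩ := hblk
      have hp := PySem.List.sorted_pairwise (pvG co l c) (fun x => x)
      refine List.Pairwise.imp_of_mem ?_ hp
      intro a b ha hb hab
      have hfa := (pv_mem_block co l c a ha).2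
      have hfb := (pv_mem_block co l c b hb).2
      simp only [pvF] at hfa hfb
      simp only [hkey, Prod.Lex.le_iff, ofLex_toLex]
      right
      exact ⟨by rw [hfa, hfb], hab⟩
    · rw [List.pairwise_map, List.pairwise_iff_getElem]
      intro i j hi hj hij x hx y hy
      have hfx := (pv_mem_block co l _ x hx).2
      have hfy := (pv_mem_block co l _ y hy).2
      simp only [pvF] at hfx hfy
      simp only [hkey, Prod.Lex.le_iff, ofLex_toLex]
      left
      rw [hfx, hfy, pv_index_getElem _ hnd i hi, pv_index_getElem _ hnd j hj]
      simpa using hij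

-- one block of B's counting sweep = A's enumerate-from-(count+1) inserts
lemma pv_blockB (co : PySem.Dict Int Int) (c : Int) (us : List Int) :
    ∀ (cnt seq : PySem.Dict Int Int), (∀ u ∈ us, pvF co u = c) →
      ((us.foldl (pvStepB co) (cnt, seq)).2
        = (PySem.List.enumerate us (cnt.getD c 0 + 1)).foldl (fun s ru => s.insert ru.2 ru.1) seq)
      ∧ ∀ c', c' ≠ c → (us.foldl (pvStepB co) (cnt, seq)).1.getD c' 0 = cnt.getD c' 0 := by
  induction us with
  | nil => intro cnt seq _; exact ⟨rfl, fun _ _ => rfl⟩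
  | cons u t ih =>
    intro cnt seq hmem
    have hu : pvF co u = c := hmem u (by simp)
    have hstep : pvStepB co (cnt, seq) u
        = (cnt.insert c (cnt.getD c 0 + 1), seq.insert u (cnt.getD c 0 + 1)) := by
      simp only [pvStepB]
      rw [show ((co.get? u).getD 0) = c from hu]
    rw [List.foldl_cons, hstep, PySem.List.enumerate_cons, List.foldl_cons]
    have hcnt : (cnt.insert c (cnt.getD c 0 + 1)).getD c 0 = cnt.getD c 0 + 1 :=
      PySem.Dict.getD_insert_self _ _ _ _
    obtain ⟨h1, h2⟩ := ih (cnt.insert c (cnt.getD c 0 + 1)) (seq.insert u (cnt.getD c 0 + 1))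
      (fun v hv => hmem v (by simp [hv]))
    refine ⟨?_, ?_⟩
    · rw [h1, hcnt]
    · intro c' hc'
      rw [h2 c' hc', PySem.Dict.getD_insert_of_ne _ _ _ hc']

-- B's whole sweep over the concatenated blocks = A's per-corpus enumerate loops
lemma pv_blocksB (co : PySem.Dict Int Int) : ∀ (cs : List Int) (G : Int → List Int)
    (cnt seq : PySem.Dict Int Int), cs.Nodup →
    (∀ c ∈ cs, ∀ u ∈ G c, pvF co u = c) → (∀ c ∈ cs, cnt.getD c 0 = 0) →
    ((cs.flatMap G).foldl (pvStepB co) (cnt, seq)).2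
      = cs.foldl (fun s c =>
          (PySem.List.enumerate (G c) 1).foldl (fun s ru => s.insert ru.2 ru.1) s) seq := by
  intro cs
  induction cs with
  | nil => intro G cnt seq _ _ _; rfl
  | cons c cs ih =>
    intro G cnt seq hnd hmem hcnt
    rw [List.flatMap_cons, List.foldl_append, List.foldl_cons]
    obtain ⟨h1, h2⟩ := pv_blockB co c (G c) cnt seq (hmem c (by simp))
    have hc0 : cnt.getD c 0 = 0 := hcnt c (by simp)
    rw [hc0] at h1
    have hr : (G c).foldl (pvStepB co) (cnt, seq)
        = (((G c).foldl (pvStepB co) (cnt, seq)).1,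
           (PySem.List.enumerate (G c) (0 + 1)).foldl (fun s ru => s.insert ru.2 ru.1) seq) := by
      rw [← h1]
    rw [hr]
    rw [show ((0 : Int) + 1) = 1 by ring]
    apply ih G _ _ (List.nodup_cons.mp hnd).2 (fun c' hc' => hmem c' (by simp [hc']))
    intro c' hc'
    have hne : c' ≠ c := by rintro rfl; exact (List.nodup_cons.mp hnd).1 hc'
    rw [h2 c' hne]
    exact hcnt c' (by simp [hc'])


lemma pvA_eq (leaf_ids : List Int) (corpus_id_of : List (Int × Int)) :
    compute_corpus_seqs leaf_ids corpus_id_of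
    = (((pvC (PySem.Dict.mk corpus_id_of) leaf_ids).foldl (fun s c =>
        (PySem.List.enumerate (PySem.List.sorted (pvG (PySem.Dict.mk corpus_id_of) leaf_ids c)
          (fun x => x)) 1).foldl
          (fun s ru => s.insert ru.2 ru.1) s) PySem.Dict.empty).items) := by
  simp only [compute_corpus_seqs]
  rw [pv_grp, pv_items_byc, List.foldl_map]

lemma pvB_eq (leaf_ids : List Int) (corpus_id_of : List (Int × Int)) :
    compute_corpus_seqs_alt leaf_ids corpus_id_of
    = (((pvC (PySem.Dict.mk corpus_id_of) leaf_ids).foldl (fun s c =>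
        (PySem.List.enumerate (PySem.List.sorted (pvG (PySem.Dict.mk corpus_id_of) leaf_ids c)
          (fun x => x)) 1).foldl
          (fun s ru => s.insert ru.2 ru.1) s) PySem.Dict.empty).items) := by
  simp only [compute_corpus_seqs_alt]
  rw [PySem.List.foldl_append_if_eq_filter, List.nil_append, PySem.List.dedup_eq_ofList]
  rw [show List.filter (fun u => (PySem.Dict.mk corpus_id_of).contains u) leaf_ids
      = pvQ (PySem.Dict.mk corpus_id_of) leaf_ids from rfl]
  rw [show PySem.Set.ofList ((pvQ (PySem.Dict.mk corpus_id_of) leaf_ids).map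
        (fun u => ((PySem.Dict.mk corpus_id_of).get? u).getD 0))
      = pvC (PySem.Dict.mk corpus_id_of) leaf_ids from rfl]
  rw [pv_es_eq]
  rw [show (fun (st : PySem.Dict Int Int × PySem.Dict Int Int) u =>
      (st.1.insert (((PySem.Dict.mk corpus_id_of).get? u).getD 0)
        (st.1.getD (((PySem.Dict.mk corpus_id_of).get? u).getD 0) 0 + 1),
       st.2.insert u (st.1.getD (((PySem.Dict.mk corpus_id_of).get? u).getD 0) 0 + 1)))
      = pvStepB (PySem.Dict.mk corpus_id_of) from rfl]
  rw [pv_blocksB (PySem.Dict.mk corpus_id_of)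
      (pvC (PySem.Dict.mk corpus_id_of) leaf_ids)
      (fun c => PySem.List.sorted (pvG (PySem.Dict.mk corpus_id_of) leaf_ids c) (fun x => x))
      PySem.Dict.empty PySem.Dict.empty
      (PySem.Set.nodup_ofList _)
      (fun c _ u hu => (pv_mem_block _ _ c u hu).2)
      (fun c _ => PySem.Dict.getD_empty _ _)]

-- ===== VERDICT (by name: the statement is the Claim_ definition above) =====
theorem compute_corpus_seqs_spec : Claim_equal_compute_corpus_seqs := by
  intro leaf_ids corpus_id_of _
  unfold Spec_compute_corpus_seqs
  rw [pvA_eq, pvB_eq]
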